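-- pv_equiv track=rewrite | github.com/daianalonso/python-UNSAM | ejercicios_python/Clase04/propaga.py | propagar
-- ===== SOURCE A (Python) =====
-- def propagar(unosyceros):
--     n = len(unosyceros)
--     for i in range(n-1):
--         if unosyceros[i] == 1:
--             if unosyceros[i+1] == 0:
--                 unosyceros[i+1] = 1
--     for j in range(n-1,0,-1):
--         if unosyceros[j] == 1:
--             if unosyceros[j-1] == 0:
--                     unosyceros[j-1] = 1
--     return unosyceros
-- ===== SOURCE B (Python) =====
-- def propagar(unosyceros):
--     # Single forward pass: count a pending run of zeros and flush it when its right
--     # neighbor (or end of list) is reached; fill the run with 1s in place iff the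
--     # element left of the run or right of the run equals 1.
--     left = None
--     start = 0
--     pend = 0
--     for idx, x in enumerate(unosyceros):
--         if x == 0:
--             if pend == 0:
--                 start = idx
--             pend += 1
--         else:
--             if pend > 0 and (left == 1 or x == 1):
--                 for k in range(start, idx):
--                     unosyceros[k] = 1
--             pend = 0
--             left = x
--     if pend > 0 and left == 1:
--         for k in range(start, len(unosyceros)):
--             unosyceros[k] = 1
--     return unosyceros
-- ===== Notes on version B (the rewrite author's own statement) =====
-- stated objective: alternative
-- what changed: A makes two directional index sweeps (left-to-right then right-to-left) over the list; B makes a single pass that buffers each maximal run of zeros and, at its right boundary, fills the run with 1s in place iff the element adjacent on its left or right equals 1.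
import Mathlib
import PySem

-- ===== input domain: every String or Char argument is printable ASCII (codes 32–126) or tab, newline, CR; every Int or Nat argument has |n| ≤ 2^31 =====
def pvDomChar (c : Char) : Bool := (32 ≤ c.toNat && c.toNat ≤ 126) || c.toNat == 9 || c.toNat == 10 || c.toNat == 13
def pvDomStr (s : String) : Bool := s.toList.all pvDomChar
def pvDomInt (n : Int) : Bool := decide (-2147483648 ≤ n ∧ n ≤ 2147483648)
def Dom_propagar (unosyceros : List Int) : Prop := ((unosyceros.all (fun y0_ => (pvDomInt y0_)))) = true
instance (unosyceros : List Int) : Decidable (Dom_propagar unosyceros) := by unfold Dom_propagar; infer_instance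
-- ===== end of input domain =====

-- B replaces A's two directional index sweeps by a single pass that buffers each run of
-- zeros and flushes it at its right boundary (alternative decomposition); equivalence is
-- about the return value — both Pythons mutate the argument list in place.

-- ===== PORT A =====
def fwdBody (acc : List Int) (i : Int) : List Int :=
  if PySem.List.pyGetD acc i 0 == 1 then
    if PySem.List.pyGetD acc (i + 1) 0 == 0 then PySem.List.pySetD acc (i + 1) 1 else acc
  else acc

def bwdBody (acc : List Int) (j : Int) : List Int :=
  if PySem.List.pyGetD acc j 0 == 1 then
    if PySem.List.pyGetD acc (j - 1) 0 == 0 then PySem.List.pySetD acc (j - 1) 1 else acc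
  else acc

def propagar (unosyceros : List Int) : List Int :=
  let n : Int := unosyceros.length
  let u1 := (PySem.List.pyRange 0 (n - 1) 1).foldl fwdBody unosyceros
  (PySem.List.pyRange (n - 1) 0 (-1)).foldl bwdBody u1

-- ===== PORT B =====
-- one pass: 'left' = last non-zero element seen (none at the edge), 'pend' = length of
-- the pending zero-run; on reaching the run's right boundary the run is written back,
-- as 1s iff a neighbouring element equals 1 (Source B writes the 1s in place and otherwise
-- leaves the zeros untouched; writing the unfilled run back as 'replicate pend 0'
-- produces the same values)
def goB : Option Int → Nat → List Int → List Int
  | left, pend, [] =>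
    List.replicate pend (if left == some 1 then 1 else 0)
  | left, pend, x :: xs =>
    if x = 0 then
      goB left (pend + 1) xs
    else
      List.replicate pend (if left == some 1 || x == 1 then 1 else 0)
        ++ x :: goB (some x) 0 xs

def propagar_alt (unosyceros : List Int) : List Int := goB none 0 unosyceros

-- ===== PRECONDITION & SPEC =====
def Spec_propagar (unosyceros : List Int) (out : List Int) : Prop := out = propagar_alt unosyceros
instance (unosyceros : List Int) (out : List Int) : Decidable (Spec_propagar unosyceros out) := by unfold Spec_propagar; infer_instance

-- ===== CLAIM (what is proved, stated in full; the proofs are below) =====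
def Claim_equal_propagar : Prop := ∀ (unosyceros : List Int), Dom_propagar unosyceros → Spec_propagar unosyceros (propagar unosyceros)

-- ===== LEMMAS AND PROOFS =====

-- recursive characterisation of A's forward sweep (p = value now standing just left)
def fwdL (p : Int) : List Int → List Int
  | [] => []
  | x :: xs => (if p = 1 ∧ x = 0 then 1 else x) :: fwdL (if p = 1 ∧ x = 0 then 1 else x) xs

-- recursive characterisation of A's backward sweep
def bwd : List Int → List Int
  | [] => []
  | x :: xs =>
    let ys := bwd xs
    if x = 0 ∧ ys.head? = some 1 then 1 :: ys else x :: ys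

lemma pyGetD_cons_pos (x : Int) (l : List Int) (i : Int) (d : Int) (h : 1 ≤ i) :
    PySem.List.pyGetD (x :: l) i d = PySem.List.pyGetD l (i - 1) d := by
  have hnat : i.toNat = (i - 1).toNat + 1 := by omega
  simp only [PySem.List.pyGetD, PySem.List.pyGet?, PySem.List.pyIdx?, List.length_cons]
  by_cases hi : i < (l.length : Int) + 1
  · rw [if_pos (by omega), if_pos (by push_cast; omega), if_pos (by omega), if_pos (by push_cast; omega)]
    rw [hnat]
    simp
  · rw [if_pos (by omega), if_neg (by push_cast; omega), if_pos (by omega), if_neg (by push_cast; omega)]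
    simp
lemma pySetD_cons_pos (x v : Int) (l : List Int) (i : Int) (h : 1 ≤ i) :
    PySem.List.pySetD (x :: l) i v = x :: PySem.List.pySetD l (i - 1) v := by
  have hnat : i.toNat = (i - 1).toNat + 1 := by omega
  simp only [PySem.List.pySetD, PySem.List.pySet?, PySem.List.pyIdx?, List.length_cons]
  by_cases hi : i < (l.length : Int) + 1
  · rw [if_pos (by omega), if_pos (by push_cast; omega), if_pos (by omega), if_pos (by push_cast; omega)]
    rw [hnat]
    simp
  · rw [if_pos (by omega), if_neg (by push_cast; omega), if_pos (by omega), if_neg (by push_cast; omega)]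
    simp
lemma fwdBody_cons (x : Int) (l : List Int) (i : Int) (h : 1 ≤ i) :
    fwdBody (x :: l) i = x :: fwdBody l (i - 1) := by
  have e : i + 1 - 1 = i - 1 + 1 := by ring
  simp only [fwdBody, pyGetD_cons_pos _ _ _ _ h, pyGetD_cons_pos _ _ _ _ (by omega : (1:Int) ≤ i + 1),
    pySetD_cons_pos _ _ _ _ (by omega : (1:Int) ≤ i + 1), e]
  split_ifs <;> rfl
lemma bwdBody_cons (x : Int) (l : List Int) (j : Int) (h : 2 ≤ j) :
    bwdBody (x :: l) j = x :: bwdBody l (j - 1) := by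
  simp only [bwdBody, pyGetD_cons_pos _ _ _ _ (by omega : (1:Int) ≤ j),
    pyGetD_cons_pos _ _ _ _ (by omega : (1:Int) ≤ j - 1),
    pySetD_cons_pos _ _ _ _ (by omega : (1:Int) ≤ j - 1)]
  split_ifs <;> rfl
lemma fwd_shift_aux (n : Nat) : ∀ (a b x : Int) (l : List Int), 1 ≤ a → (b - a).toNat = n →
    (PySem.List.pyRange a b 1).foldl fwdBody (x :: l)
      = x :: (PySem.List.pyRange (a - 1) (b - 1) 1).foldl fwdBody l := by
  induction n with
  | zero =>
    intro a b x l ha hn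
    rw [PySem.List.pyRange_one_eq_nil (by omega), PySem.List.pyRange_one_eq_nil (by omega)]
    rfl
  | succ k ih =>
    intro a b x l ha hn
    rw [PySem.List.pyRange_one_cons (by omega), PySem.List.pyRange_one_cons (by omega : a - 1 < b - 1)]
    simp only [List.foldl_cons]
    rw [fwdBody_cons _ _ _ ha]
    have := ih (a + 1) b x (fwdBody l (a - 1)) (by omega) (by omega)
    simpa using this
lemma fwd_shift (x : Int) (l : List Int) (a b : Int) (h : 1 ≤ a) :
    (PySem.List.pyRange a b 1).foldl fwdBody (x :: l)
      = x :: (PySem.List.pyRange (a - 1) (b - 1) 1).foldl fwdBody l :=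
  fwd_shift_aux (b - a).toNat a b x l h rfl
lemma bwd_shift_aux (n : Nat) : ∀ (a x : Int) (l : List Int), (a - 1).toNat = n →
    (PySem.List.pyRange a 1 (-1)).foldl bwdBody (x :: l)
      = x :: (PySem.List.pyRange (a - 1) 0 (-1)).foldl bwdBody l := by
  induction n with
  | zero =>
    intro a x l hn
    rw [PySem.List.pyRange_neg_one_eq_nil (by omega), PySem.List.pyRange_neg_one_eq_nil (by omega)]
    rfl
  | succ k ih =>
    intro a x l hn
    rw [PySem.List.pyRange_neg_one_cons (by omega : (1:Int) < a),
        PySem.List.pyRange_neg_one_cons (by omega : (0:Int) < a - 1)]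
    simp only [List.foldl_cons]
    rw [bwdBody_cons _ _ _ (by omega : (2:Int) ≤ a)]
    have := ih (a - 1) x (bwdBody l (a - 1)) (by omega)
    simpa using this
lemma bwd_shift (x : Int) (l : List Int) (a : Int) :
    (PySem.List.pyRange a 1 (-1)).foldl bwdBody (x :: l)
      = x :: (PySem.List.pyRange (a - 1) 0 (-1)).foldl bwdBody l :=
  bwd_shift_aux (a - 1).toNat a x l rfl
lemma pyRange_neg_split_aux (n : Nat) : ∀ (a : Int), 1 ≤ a → (a - 1).toNat = n →
    PySem.List.pyRange a 0 (-1) = PySem.List.pyRange a 1 (-1) ++ [1] := by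
  induction n with
  | zero =>
    intro a ha hn
    have : a = 1 := by omega
    subst this
    decide
  | succ k ih =>
    intro a ha hn
    rw [PySem.List.pyRange_neg_one_cons (by omega : (0:Int) < a),
        PySem.List.pyRange_neg_one_cons (by omega : (1:Int) < a), ih (a - 1) (by omega) (by omega)]
    rfl
lemma pyRange_neg_split (a : Int) (h : 1 ≤ a) :
    PySem.List.pyRange a 0 (-1) = PySem.List.pyRange a 1 (-1) ++ [1] :=
  pyRange_neg_split_aux (a - 1).toNat a h rfl
lemma pyGetD_one_cons (x : Int) (t : List Int) :
    PySem.List.pyGetD (x :: t) 1 0 = t.getD 0 0 := by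
  rw [pyGetD_cons_pos _ _ _ _ le_rfl]
  norm_num [PySem.List.pyGetD_zero]

lemma pySetD_zero_cons (x v : Int) (t : List Int) :
    PySem.List.pySetD (x :: t) 0 v = v :: t := by
  simp [PySem.List.pySetD, PySem.List.pySet?, PySem.List.pyIdx?]

lemma fwdBody_zero (x y : Int) (ys : List Int) :
    fwdBody (x :: y :: ys) 0 = x :: (if x = 1 ∧ y = 0 then 1 else y) :: ys := by
  simp only [fwdBody, PySem.List.pyGetD_zero_cons, zero_add, pyGetD_one_cons,
    pySetD_cons_pos _ _ _ _ (le_refl (1:Int)), pySetD_zero_cons]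
  norm_num
  by_cases h1 : x = 1 <;> by_cases h2 : y = 0 <;> simp [h1, h2, pySetD_zero_cons]

lemma bwdBody_one (x : Int) (t : List Int) :
    bwdBody (x :: t) 1 = if t.getD 0 0 = 1 ∧ x = 0 then 1 :: t else x :: t := by
  simp only [bwdBody, pyGetD_one_cons, PySem.List.pyGetD_zero_cons]
  norm_num [pySetD_zero_cons]
  by_cases h1 : t.getD 0 0 = 1 <;> by_cases h2 : x = 0 <;> simp [h1, h2]

lemma fwd_eq (xs : List Int) (x : Int) :
    (PySem.List.pyRange 0 (xs.length : Int) 1).foldl fwdBody (x :: xs) = x :: fwdL x xs := by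
  induction xs generalizing x with
  | nil => rfl
  | cons y ys ih =>
    have hcast : ((y :: ys).length : Int) = (ys.length : Int) + 1 := by
      simp
    rw [hcast, PySem.List.pyRange_one_cons (by omega)]
    simp only [List.foldl_cons, zero_add, fwdBody_zero]
    have hs := fwd_shift x ((if x = 1 ∧ y = 0 then 1 else y) :: ys) 1 ((ys.length : Int) + 1) (le_refl 1)
    rw [hs, show (1:Int) - 1 = 0 by ring, show ((ys.length : Int) + 1 - 1 : Int) = (ys.length : Int) by ring,
        ih]
    rfl
lemma bwd_eq (u : List Int) :
    (PySem.List.pyRange ((u.length : Int) - 1) 0 (-1)).foldl bwdBody u = bwd u := by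
  induction u with
  | nil => rfl
  | cons x xs ih =>
    by_cases hx : xs = []
    · subst hx; simp [bwd, PySem.List.pyRange_neg_one_eq_nil]
    · have hlen : 1 ≤ (xs.length : Int) := by
        cases xs with | nil => simp_all | cons a as => simp
      have e : ((x :: xs).length : Int) - 1 = (xs.length : Int) := by push_cast; simp
      rw [e, pyRange_neg_split _ hlen, List.foldl_append, bwd_shift, ih]
      simp only [List.foldl_cons, List.foldl_nil]
      show bwdBody (x :: bwd xs) 1 = bwd (x :: xs)
      rw [show bwd (x :: xs) = (if x = 0 ∧ (bwd xs).head? = some 1 then 1 :: bwd xs else x :: bwd xs) from rfl,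
          bwdBody_one]
      cases ht : bwd xs with
      | nil => simp
      | cons h t =>
        by_cases h1 : h = 1 <;> by_cases h2 : x = 0 <;> simp [h1, h2]
lemma fwdL_length (p : Int) (l : List Int) : (fwdL p l).length = l.length := by
  induction l generalizing p with
  | nil => rfl
  | cons x xs ih => simp [fwdL, ih]
lemma fwdL_congr (p q : Int) (l : List Int) (hp : p ≠ 1) (hq : q ≠ 1) :
    fwdL p l = fwdL q l := by
  cases l with
  | nil => rfl
  | cons x xs =>
    have h1 : ¬(p = 1 ∧ x = 0) := fun h => hp h.1
    have h2 : ¬(q = 1 ∧ x = 0) := fun h => hq h.1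
    simp only [fwdL, if_neg h1, if_neg h2]
lemma fwdL_one_repl (k : Nat) (t : List Int) :
    fwdL 1 (List.replicate k 0 ++ t) = List.replicate k 1 ++ fwdL 1 t := by
  induction k with
  | zero => rfl
  | succ n ih => simp only [List.replicate_succ, List.cons_append, fwdL]; norm_num [ih]
lemma fwdL_zero_repl (k : Nat) (t : List Int) :
    fwdL 0 (List.replicate k 0 ++ t) = List.replicate k 0 ++ fwdL 0 t := by
  induction k with
  | zero => rfl
  | succ n ih => simp only [List.replicate_succ, List.cons_append, fwdL]; norm_num [ih]
lemma bwd_cons_ne (x : Int) (t : List Int) (h : x ≠ 0) : bwd (x :: t) = x :: bwd t := by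
  simp [bwd, h]
lemma bwd_repl_one (k : Nat) (t : List Int) :
    bwd (List.replicate k 1 ++ t) = List.replicate k 1 ++ bwd t := by
  induction k with
  | zero => rfl
  | succ n ih => simp only [List.replicate_succ, List.cons_append, bwd, ih]; norm_num
lemma bwd_repl_zero_head_one (k : Nat) (t : List Int) (h : (bwd t).head? = some 1) :
    bwd (List.replicate k 0 ++ t) = List.replicate k 1 ++ bwd t := by
  induction k with
  | zero => rfl
  | succ n ih =>
    simp only [List.replicate_succ, List.cons_append, bwd, ih]
    cases n with
    | zero => simp [h]
    | succ m => simp [List.replicate_succ]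
lemma bwd_repl_zero_head_ne (k : Nat) (t : List Int) (h : (bwd t).head? ≠ some 1) :
    bwd (List.replicate k 0 ++ t) = List.replicate k 0 ++ bwd t := by
  induction k with
  | zero => rfl
  | succ n ih =>
    simp only [List.replicate_succ, List.cons_append, bwd, ih]
    cases n with
    | zero => simp [h]
    | succ m => simp [List.replicate_succ]
lemma fwdL_cons_ne (p x : Int) (xs : List Int) (hx : x ≠ 0) :
    fwdL p (x :: xs) = x :: fwdL x xs := by
  have h : ¬(p = 1 ∧ x = 0) := fun h => hx h.2
  simp only [fwdL, if_neg h]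
lemma main_eq (l : List Int) : ∀ (po : Option Int) (pend : Nat),
    bwd (fwdL (if po == some 1 then 1 else 0) (List.replicate pend 0 ++ l)) = goB po pend l := by
  induction l with
  | nil =>
    intro po pend
    by_cases hpo : po == some 1
    · simp only [hpo, if_true, List.append_nil, goB]
      rw [show (List.replicate pend (0:Int)) = List.replicate pend 0 ++ [] by simp,
          fwdL_one_repl, bwd_repl_one]
      simp [fwdL, bwd]
    · simp only [hpo, if_false, List.append_nil, goB, Bool.false_eq_true]
      rw [show (List.replicate pend (0:Int)) = List.replicate pend 0 ++ [] by simp,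
          fwdL_zero_repl, bwd_repl_zero_head_ne]
      · simp [fwdL, bwd, hpo]
      · simp [fwdL, bwd]
  | cons x xs ih =>
    intro po pend
    by_cases hx : x = 0
    · subst hx
      have e : List.replicate pend (0:Int) ++ 0 :: xs = List.replicate (pend + 1) 0 ++ xs := by
        simp [List.replicate_succ', List.append_assoc]
      rw [e, ih po (pend + 1)]
      simp [goB]
    · have hrw : ∀ q : Int, fwdL q (x :: xs) = x :: fwdL x xs := fun q => fwdL_cons_ne q x xs hx
      have hih : bwd (fwdL x xs) = goB (some x) 0 xs := by
        have := ih (some x) 0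
        simp only [List.replicate, List.nil_append] at this
        by_cases hx1 : x = 1
        · subst hx1; simpa using this
        · have : bwd (fwdL 0 xs) = goB (some x) 0 xs := by
            simpa [show ((some x == some (1:Int)) = false) by simp [hx1]] using this
          rw [fwdL_congr x 0 xs hx1 (by norm_num)]
          exact this
      by_cases hpo : po == some 1
      · rw [if_pos hpo, fwdL_one_repl, hrw, bwd_repl_one, bwd_cons_ne _ _ hx, hih]
        simp [goB, hx, hpo]
      · rw [if_neg hpo, fwdL_zero_repl, hrw]
        by_cases hx1 : x = 1
        · subst hx1
          rw [bwd_repl_zero_head_one]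
          · rw [bwd_cons_ne _ _ hx, hih]
            simp [goB, hx, hpo]
          · rw [bwd_cons_ne _ _ hx]; rfl
        · rw [bwd_repl_zero_head_ne]
          · rw [bwd_cons_ne _ _ hx, hih]
            simp [goB, hx, hpo, hx1]
          · rw [bwd_cons_ne _ _ hx]; simp [hx1]

-- ===== VERDICT (by name: the statement is the Claim_ definition above) =====
theorem propagar_spec : Claim_equal_propagar := by
  intro u _
  unfold Spec_propagar
  cases u with
  | nil => rfl
  | cons x xs =>
    show (PySem.List.pyRange (((x :: xs).length : Int) - 1) 0 (-1)).foldl bwdBody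
      ((PySem.List.pyRange 0 (((x :: xs).length : Int) - 1) 1).foldl fwdBody (x :: xs))
      = propagar_alt (x :: xs)
    have e : ((x :: xs).length : Int) - 1 = (xs.length : Int) := by simp
    rw [e, fwd_eq]
    have e2 : (xs.length : Int) = ((x :: fwdL x xs).length : Int) - 1 := by
      simp [fwdL_length]
    rw [e2, bwd_eq]
    have h3 : x :: fwdL x xs = fwdL 0 (x :: xs) := by
      simp only [fwdL]; norm_num
    rw [h3]
    have := main_eq (x :: xs) none 0
    simpa [propagar_alt] using this
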